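-- pv_equiv track=rewrite | github.com/ooz/exercise | codility/TieRopes.py | solution
-- ===== SOURCE A (Python) =====
-- def solution(K, A):
--     # write your code in Python 2.7
--     tied_rope = 0
--     nr_ropes = 0
--     for rope in A:
--         if rope >= K:
--             nr_ropes += 1
--         else:
--             tied_rope += rope
--             if tied_rope >= K:
--                 nr_ropes += 1
--                 tied_rope = 0
--     return nr_ropes
-- ===== SOURCE B (Python) =====
-- def solution(K, A):
--     # Pipeline: filter short ropes, build their absolute prefix sums,
--     # then count cuts by advancing a moving target over the prefix sums.
--     shorts = [r for r in A if r < K]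
--     prefix = []
--     s = 0
--     for r in shorts:
--         s += r
--         prefix.append(s)
--     cnt = 0
--     target = K
--     for p in prefix:
--         if p >= target:
--             cnt += 1
--             target = p + K
--     return (len(A) - len(shorts)) + cnt
-- ===== Notes on version B (the rewrite author's own statement) =====
-- stated objective: alternative
-- what changed: B replaces A's reset-to-zero running accumulator by a filter/prefix-sum/moving-target pipeline: it filters out the short ropes, builds their absolute prefix sums, and counts a tie whenever a prefix sum reaches a moving target (previous cut's prefix sum + K); ropes already >= K are counted as len(A) - len(shorts).
import Mathlib
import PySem

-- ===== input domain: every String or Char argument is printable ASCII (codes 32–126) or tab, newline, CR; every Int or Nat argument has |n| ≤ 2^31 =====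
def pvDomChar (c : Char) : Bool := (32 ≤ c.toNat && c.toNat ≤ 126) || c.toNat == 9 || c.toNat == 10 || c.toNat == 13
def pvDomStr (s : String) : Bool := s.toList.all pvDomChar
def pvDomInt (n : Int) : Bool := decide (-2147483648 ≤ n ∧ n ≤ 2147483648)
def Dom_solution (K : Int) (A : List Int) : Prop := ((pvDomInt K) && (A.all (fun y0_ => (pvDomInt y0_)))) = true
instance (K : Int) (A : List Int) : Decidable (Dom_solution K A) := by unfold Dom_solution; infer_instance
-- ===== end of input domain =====

-- B replaces A's reset-to-zero accumulator by a filter / prefix-sum / moving-target pipeline (same cost).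

-- ===== PORT A =====
-- A: one loop over A with accumulator state (tied_rope, nr_ropes).
def solution (K : Int) (A : List Int) : Int :=
  (A.foldl (fun st rope =>
    if rope ≥ K then (st.1, st.2 + 1)
    else
      let t := st.1 + rope
      if t ≥ K then ((0 : Int), st.2 + 1) else (t, st.2)) ((0 : Int), (0 : Int))).2

-- ===== PORT B =====
-- B: filter the short ropes, build their absolute prefix sums, then count
-- ties with a moving target (previous cut's prefix sum + K).
def solution_alt (K : Int) (A : List Int) : Int :=
  let shorts := A.filter (fun r => decide (r < K))
  let pre := (shorts.foldl (fun (st : List Int × Int) r =>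
      (st.1 ++ [st.2 + r], st.2 + r)) (([] : List Int), (0 : Int))).1
  let cnt := (pre.foldl (fun (st : Int × Int) p =>
      if p ≥ st.2 then (st.1 + 1, p + K) else st) ((0 : Int), K)).1
  ((A.length : Int) - (shorts.length : Int)) + cnt

-- ===== PRECONDITION & SPEC =====
def Spec_solution (K : Int) (A : List Int) (out : Int) : Prop := out = solution_alt K A
instance (K : Int) (A : List Int) (out : Int) : Decidable (Spec_solution K A out) := by unfold Spec_solution; infer_instance

-- ===== CLAIM (what is proved, stated in full; the proofs are below) =====
def Claim_equal_solution : Prop := ∀ (K : Int) (A : List Int), Dom_solution K A → Spec_solution K A (solution K A)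

-- ===== LEMMAS AND PROOFS =====

-- the greedy reset loop over the short ropes only (proof-only helper)
def pvGreedy (K : Int) (rs : List Int) (st : Int × Int) : Int × Int :=
  rs.foldl (fun st r =>
    let t := st.1 + r
    if t ≥ K then ((0 : Int), st.2 + 1) else (t, st.2)) st

-- prefix sums starting from cumulative value c (proof-only helper)
def pvPrefix (c : Int) : List Int → List Int
  | [] => []
  | r :: rest => (c + r) :: pvPrefix (c + r) rest

theorem pvGreedy_add (K : Int) (rs : List Int) (s m : Int) :
    (pvGreedy K rs (s, m)).2 = m + (pvGreedy K rs (s, 0)).2 := by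
  induction rs generalizing s m with
  | nil => simp [pvGreedy]
  | cons r rest ih =>
    simp only [pvGreedy, List.foldl_cons] at ih ⊢
    by_cases h : s + r ≥ K
    · simp only [if_pos h]
      have h1 := ih 0 (m + 1)
      have h2 := ih 0 (0 + 1)
      omega
    · simp only [if_neg h]
      have h1 := ih (s + r) m
      omega

-- A's loop = (count of long ropes) + (greedy over the filtered short ropes)
theorem solution_split (K : Int) (A : List Int) (t n : Int) :
    (A.foldl (fun st rope =>
      if rope ≥ K then (st.1, st.2 + 1)
      else
        let u := st.1 + rope
        if u ≥ K then ((0 : Int), st.2 + 1) else (u, st.2)) (t, n)).2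
    = n + (((A.length : Int)) - ((A.filter (fun r => decide (r < K))).length : Int))
        + (pvGreedy K (A.filter (fun r => decide (r < K))) (t, 0)).2 := by
  induction A generalizing t n with
  | nil => simp [pvGreedy]
  | cons r rest ih =>
    simp only [List.foldl_cons, List.filter_cons, List.length_cons]
    by_cases h : r ≥ K
    · have h' : ¬ r < K := by omega
      simp only [if_pos h, h', decide_false, Bool.false_eq_true, if_false]
      rw [ih]
      push_cast
      omega
    · have h' : r < K := by omega
      simp only [if_neg h, h', decide_true, if_true, List.length_cons]
      simp only [pvGreedy, List.foldl_cons]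
      by_cases hu : t + r ≥ K
      · simp only [if_pos hu]
        rw [ih]
        have hadd := pvGreedy_add K (rest.filter (fun r => decide (r < K))) 0 1
        simp only [pvGreedy] at hadd ⊢
        push_cast
        omega
      · simp only [if_neg hu]
        rw [ih]
        simp only [pvGreedy]
        push_cast
        omega

-- B's prefix-list builder produces pvPrefix
theorem prefix_build (rs : List Int) (acc : List Int) (c : Int) :
    (rs.foldl (fun (st : List Int × Int) r =>
        (st.1 ++ [st.2 + r], st.2 + r)) (acc, c)).1 = acc ++ pvPrefix c rs := by
  induction rs generalizing acc c with
  | nil => simp [pvPrefix]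
  | cons r rest ih =>
    simp only [List.foldl_cons, pvPrefix]
    rw [ih]
    simp

-- moving-target scan over absolute prefix sums = greedy reset loop
-- invariant: greedy running sum = c0 - target + K
theorem target_scan (K : Int) (rs : List Int) (c0 target n0 cnt0 : Int) :
    (pvGreedy K rs (c0 - target + K, n0)).2
    = n0 - cnt0 + ((pvPrefix c0 rs).foldl (fun (st : Int × Int) p =>
        if p ≥ st.2 then (st.1 + 1, p + K) else st) (cnt0, target)).1 := by
  induction rs generalizing c0 target n0 cnt0 with
  | nil => simp [pvGreedy, pvPrefix]
  | cons r rest ih =>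
    simp only [pvGreedy, pvPrefix, List.foldl_cons] at ih ⊢
    by_cases h : c0 + r ≥ target
    · have hu : c0 - target + K + r ≥ K := by omega
      simp only [if_pos hu, if_pos h]
      have := ih (c0 + r) (c0 + r + K) (n0 + 1) (cnt0 + 1)
      rw [show c0 + r - (c0 + r + K) + K = 0 by ring] at this
      omega
    · have hu : ¬ c0 - target + K + r ≥ K := by omega
      simp only [if_neg hu, if_neg h]
      have := ih (c0 + r) target n0 cnt0
      rw [show c0 + r - target + K = c0 - target + K + r by ring] at this
      omega

-- ===== VERDICT (by name: the statement is the Claim_ definition above) =====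
theorem solution_spec : Claim_equal_solution := by
  intro K A _
  unfold Spec_solution solution
  rw [solution_split K A 0 0]
  simp only [solution_alt, prefix_build, List.nil_append]
  have hsc := target_scan K (A.filter (fun r => decide (r < K))) 0 K 0 0
  rw [show (0 : Int) - K + K = 0 by ring] at hsc
  omega
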